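-- pv_equiv track=rewrite | github.com/TheAnsarya/dragon-warrior-4-info | tools/emulate_exp_full.py | calculate_init_values
-- ===== SOURCE A (Python) =====
-- def calculate_init_values(data):
-- 	"""
-- 	Emulate $A038 init routine.
-- 	Input: 5 bytes of character EXP data
-- 	Output: ($7B value, rate_index)
-- 	"""
-- 	# Collect high bits via ROR
-- 	val_7b = 0
-- 	for b in data:
-- 		carry = (b >> 7) & 1
-- 		val_7b = ((val_7b >> 1) & 0x7f) | (carry << 7)
--
-- 	# 3 LSRs
-- 	val_7b >>= 3
--
-- 	# Rate index from byte 0 bits 6,5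
-- 	# AND #$60, then LSR x3
-- 	rate_idx = ((data[0] & 0x60) >> 3)
--
-- 	# Extract level thresholds from low bits
-- 	thresholds = []
-- 	thresholds.append(data[0] & 0x1f)  # Byte 0 bits 0-4 (first threshold)
-- 	for i in range(1, 5):
-- 		thresholds.append(data[i] & 0x7f)  # Bytes 1-4 bits 0-6
--
-- 	return val_7b, rate_idx, thresholds
-- ===== SOURCE B (Python) =====
-- def calculate_init_values(data):
-- 	# Closed-form bit-pack of the last five high bits instead of the ROR shift register.
-- 	tail = data[-5:]
-- 	val_7b = sum(((b >> 7) & 1) << j for j, b in enumerate(tail))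
-- 	rate_idx = ((data[0] & 0x60) >> 3)
-- 	thresholds = [data[0] & 0x1f] + [data[i] & 0x7f for i in range(1, 5)]
-- 	return val_7b, rate_idx, thresholds
-- ===== Notes on version B (the rewrite author's own statement) =====
-- stated objective: faster
-- what changed: The ROR shift-register loop over the whole list is replaced by a closed-form bit-pack that reads only the last five bytes (data[-5:]) and sums their high bits shifted into place; rate_idx and the thresholds are computed from the first five bytes with a slice comprehension instead of an index loop.
import Mathlib
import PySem

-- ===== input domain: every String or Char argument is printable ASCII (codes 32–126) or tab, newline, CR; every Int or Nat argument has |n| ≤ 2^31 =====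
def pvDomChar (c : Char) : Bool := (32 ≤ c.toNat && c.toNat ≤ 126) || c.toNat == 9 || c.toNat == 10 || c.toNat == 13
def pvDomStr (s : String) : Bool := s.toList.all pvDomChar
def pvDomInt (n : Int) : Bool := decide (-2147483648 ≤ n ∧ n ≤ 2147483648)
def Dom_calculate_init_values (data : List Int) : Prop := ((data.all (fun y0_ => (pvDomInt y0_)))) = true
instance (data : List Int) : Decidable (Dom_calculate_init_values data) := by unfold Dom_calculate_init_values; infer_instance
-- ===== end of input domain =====

-- B replaces A's ROR shift-register loop over the whole list by a closed-form bit-pack of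
-- the high bits of the last five bytes (O(1) work on the tail instead of a pass over all data).


-- ===== PORT A =====
-- loop body of A's 'for b in data' ROR loop (carry = (b >> 7) & 1; val = ((val >> 1) & 0x7f) | (carry << 7))
def pvRorStep (v b : Int) : Int :=
  let carry := PySem.Int.band (b >>> (7:Nat)) 1
  PySem.Int.bor (PySem.Int.band (v >>> (1:Nat)) 127) (carry <<< (7:Nat))

def calculate_init_values (data : List Int) : Int × Int × List Int :=
  let val_7b := data.foldl pvRorStep 0
  let val_7b := val_7b >>> (3:Nat)
  let rate_idx := (PySem.Int.band ((PySem.List.pyGet? data 0).getD 0) 96) >>> (3:Nat)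
  let thresholds := [PySem.Int.band ((PySem.List.pyGet? data 0).getD 0) 31]
  let thresholds := (PySem.List.pyRange 1 5 1).foldl
    (fun acc i => acc ++ [PySem.Int.band ((PySem.List.pyGet? data i).getD 0) 127]) thresholds
  (val_7b, rate_idx, thresholds)

-- ===== PORT B =====
def calculate_init_values_alt (data : List Int) : Int × Int × List Int :=
  let tail := PySem.List.slice data (some (-5)) none
  -- sum(((b >> 7) & 1) << j for j, b in enumerate(tail)); j is a nonnegative enumerate index, so .toNat is exact
  let val_7b := ((PySem.List.enumerate tail 0).map
    (fun jb : Int × Int => (PySem.Int.band (jb.2 >>> (7:Nat)) 1) <<< jb.1.toNat)).sum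
  let rate_idx := (PySem.Int.band ((PySem.List.pyGet? data 0).getD 0) 96) >>> (3:Nat)
  let thresholds := PySem.Int.band ((PySem.List.pyGet? data 0).getD 0) 31 ::
    (PySem.List.pyRange 1 5 1).map (fun i => PySem.Int.band ((PySem.List.pyGet? data i).getD 0) 127)
  (val_7b, rate_idx, thresholds)

-- ===== PRECONDITION & SPEC =====
-- A indexes the first five elements, so it raises IndexError on lists shorter than five; Pre_ excludes exactly those.
def Pre_calculate_init_values (data : List Int) : Prop := 5 ≤ data.length
instance (data : List Int) : Decidable (Pre_calculate_init_values data) := by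
  unfold Pre_calculate_init_values; infer_instance

def pvWitness_calculate_init_values : List Int := [128, 200, 7, 255, 0]

def Spec_calculate_init_values (data : List Int) (out : Int × Int × List Int) : Prop := out = calculate_init_values_alt data
instance (data : List Int) (out : Int × Int × List Int) : Decidable (Spec_calculate_init_values data out) := by unfold Spec_calculate_init_values; infer_instance

-- ===== CLAIM (what is proved, stated in full; the proofs are below) =====
def Claim_equal_calculate_init_values : Prop := ∀ (data : List Int), Dom_calculate_init_values data → Pre_calculate_init_values data → Spec_calculate_init_values data (calculate_init_values data)

-- ===== LEMMAS AND PROOFS =====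

-- the closed-form pack B computes, on a given tail
def pvPack (m : List Int) : Int :=
  ((PySem.List.enumerate m 0).map
    (fun jb : Int × Int => (PySem.Int.band (jb.2 >>> (7:Nat)) 1) <<< jb.1.toNat)).sum

lemma pvCarry_bound (b : Int) :
    PySem.Int.band (b >>> (7:Nat)) 1 = 0 ∨ PySem.Int.band (b >>> (7:Nat)) 1 = 1 := by
  rw [PySem.Int.band_one]
  have h1 := PySem.Int.mod_nonneg (a := b >>> (7:Nat)) (b := 2) (by omega)
  have h2 := PySem.Int.mod_lt (a := b >>> (7:Nat)) (b := 2) (by omega)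
  omega

lemma pvLor128 : ∀ a : Nat, a < 128 → a ||| 128 = a + 128 := by decide

lemma pvRorStep_eq (v b : Int) (h0 : 0 ≤ v) (h1 : v < 256) :
    pvRorStep v b = v / 2 + 128 * PySem.Int.band (b >>> (7:Nat)) 1 := by
  simp only [pvRorStep]
  have hv1 : v >>> (1:Nat) = v / 2 := by
    rw [Int.shiftRight_eq_div_pow]; norm_num
  have hv2 : v / 2 = ((v.toNat / 2 : Nat) : Int) := by omega
  have hlt : v.toNat / 2 < 128 := by omega
  have hband : PySem.Int.band (v >>> (1:Nat)) 127 = ((v.toNat / 2 : Nat) : Int) := by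
    rw [hv1, hv2, show ((127:Int)) = ((127:Nat):Int) from rfl, PySem.Int.band_natCast]
    congr 1
    rw [show (127:Nat) = 2^7 - 1 from rfl, Nat.and_two_pow_sub_one_eq_mod]
    exact Nat.mod_eq_of_lt hlt
  rcases pvCarry_bound b with hc | hc <;> rw [hc, hband]
  · norm_num [Int.shiftLeft_eq, PySem.Int.bor_zero]
    omega
  · rw [show ((1:Int) <<< (7:Nat)) = ((128:Nat):Int) by decide, PySem.Int.bor_natCast,
      pvLor128 _ hlt]
    push_cast
    omega

lemma pvRorStep_bound (v b : Int) (h0 : 0 ≤ v) (h1 : v < 256) :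
    0 ≤ pvRorStep v b ∧ pvRorStep v b < 256 := by
  rw [pvRorStep_eq v b h0 h1]
  rcases pvCarry_bound b with hc | hc <;> rw [hc] <;> omega

lemma pvFoldl5 (v x q r s t : Int) (h0 : 0 ≤ v) (h1 : v < 256) :
    (List.foldl pvRorStep v [x, q, r, s, t]) >>> (3:Nat) = pvPack [x, q, r, s, t] := by
  have hc1 := pvCarry_bound x
  have hc2 := pvCarry_bound q
  have hc3 := pvCarry_bound r
  have hc4 := pvCarry_bound s
  have hc5 := pvCarry_bound t
  have b1 := pvRorStep_bound v x h0 h1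
  have e1 := pvRorStep_eq v x h0 h1
  have b2 := pvRorStep_bound _ q b1.1 b1.2
  have e2 := pvRorStep_eq _ q b1.1 b1.2
  have b3 := pvRorStep_bound _ r b2.1 b2.2
  have e3 := pvRorStep_eq _ r b2.1 b2.2
  have b4 := pvRorStep_bound _ s b3.1 b3.2
  have e4 := pvRorStep_eq _ s b3.1 b3.2
  have b5 := pvRorStep_bound _ t b4.1 b4.2
  have e5 := pvRorStep_eq _ t b4.1 b4.2
  have hsr : ∀ w : Int, w >>> (3:Nat) = w / 8 := by
    intro w; rw [Int.shiftRight_eq_div_pow]; norm_num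
  simp only [List.foldl_cons, List.foldl_nil] at ⊢
  rw [hsr]
  simp only [pvPack, PySem.List.enumerate_cons, PySem.List.enumerate_nil, List.map_cons,
    List.map_nil, List.sum_cons, List.sum_nil, Int.shiftLeft_eq, Int.toNat]
  norm_num
  omega

lemma pvRange15 : PySem.List.pyRange 1 5 1 = [1, 2, 3, 4] := by decide

lemma pvFoldl_ror (l : List Int) : ∀ (v : Int), 0 ≤ v → v < 256 → 5 ≤ l.length →
    (List.foldl pvRorStep v l) >>> (3:Nat) = pvPack (l.drop (l.length - 5)) := by
  induction l with
  | nil => intro v _ _ hlen; simp at hlen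
  | cons x rest ih =>
    intro v h0 h1 hlen
    by_cases h5 : 5 ≤ rest.length
    · rw [List.foldl_cons,
        ih (pvRorStep v x) (pvRorStep_bound v x h0 h1).1 (pvRorStep_bound v x h0 h1).2 h5]
      have hd : (x :: rest).length - 5 = (rest.length - 5) + 1 := by
        simp only [List.length_cons]; omega
      rw [hd, List.drop_succ_cons]
    · have h4 : rest.length = 4 := by simp only [List.length_cons] at hlen; omega
      rcases rest with _ | ⟨q, rest⟩; · simp at h4
      rcases rest with _ | ⟨r, rest⟩; · simp at h4
      rcases rest with _ | ⟨s, rest⟩; · simp at h4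
      rcases rest with _ | ⟨t, rest⟩; · simp at h4
      rcases rest with _ | ⟨u, rest⟩
      · simpa using pvFoldl5 v x q r s t h0 h1
      · simp at h4

-- ===== VERDICT (by name: the statement is the Claim_ definition above) =====
theorem calculate_init_values_spec : Claim_equal_calculate_init_values := by
  intro data _ hPre
  unfold Pre_calculate_init_values at hPre
  unfold Spec_calculate_init_values calculate_init_values calculate_init_values_alt
  have hval : (data.foldl pvRorStep 0) >>> (3:Nat)
      = pvPack (PySem.List.slice data (some (-5)) none) := by
    rw [PySem.List.slice_from_neg_ofNat data 5 (by omega)]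
    exact pvFoldl_ror data 0 le_rfl (by omega) hPre
  rcases data with _ | ⟨a, data⟩; · simp at hPre
  rcases data with _ | ⟨q, data⟩; · simp at hPre
  rcases data with _ | ⟨r, data⟩; · simp at hPre
  rcases data with _ | ⟨s, data⟩; · simp at hPre
  rcases data with _ | ⟨t, data⟩; · simp at hPre
  simp only [Prod.mk.injEq]
  refine ⟨by simpa [pvPack] using hval, by trivial, ?_⟩
  rw [pvRange15]
  norm_num [List.foldl]
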